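-- pv_equiv track=rewrite | github.com/runxunteh/coding-challenges | Google Kick Start 2018/Round B/No Nine.py | no_nine
-- ===== SOURCE A (Python) =====
-- def no_nine(F,L):
--     F=int(F)
--     L=int(L)
--     count=0
--     for i in range(F,L+1):
--         if "9" not in str(i) and i%9!=0:
--             count+=1
--     return count
-- ===== SOURCE B (Python) =====
-- def _nonine(n):
--     # n >= 0: True iff the decimal digits of n contain no 9
--     while n >= 10:
--         if n % 10 == 9:
--             return False
--         n //= 10
--     return n != 9
--
--
-- def _count9free(n):
--     # number of 9-free integers in [0..n] (0 for n < 0); O(digits)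
--     if n < 0:
--         return 0
--     q, r = divmod(n, 10)
--     return 9 * _count9free(q - 1) + (min(r, 8) + 1 if _nonine(q) else 0)
--
--
-- def _countvalid(n):
--     # number of i in [0..n] with no digit 9 and i % 9 != 0; O(digits)
--     if n < 0:
--         return 0
--     q, r = divmod(n, 10)
--     total = 8 * _count9free(q - 1)
--     if _nonine(q):
--         m = min(r, 8)
--         total += m + 1 - (1 if (-q) % 9 <= m else 0)
--     return total
--
--
-- def _prefix(n):
--     # signed count of valid i in (0..n] / -(count in (n..0]); validity is symmetric under negation
--     if n >= 0:
--         return _countvalid(n)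
--     return -_countvalid(-n - 1)
--
--
-- def no_nine(F, L):
--     F = int(F)
--     L = int(L)
--     if F > L:
--         return 0
--     return _prefix(L) - _prefix(F - 1)
-- ===== Notes on version B (the rewrite author's own statement) =====
-- stated objective: faster
-- what changed: Replaces A's element-by-element scan of [F, L] with a closed-form digit-counting prefix function (per-decade counting of 9-free / not-divisible-by-9 numbers), returning prefix(L) - prefix(F-1) in O(number of digits).
import Mathlib
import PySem

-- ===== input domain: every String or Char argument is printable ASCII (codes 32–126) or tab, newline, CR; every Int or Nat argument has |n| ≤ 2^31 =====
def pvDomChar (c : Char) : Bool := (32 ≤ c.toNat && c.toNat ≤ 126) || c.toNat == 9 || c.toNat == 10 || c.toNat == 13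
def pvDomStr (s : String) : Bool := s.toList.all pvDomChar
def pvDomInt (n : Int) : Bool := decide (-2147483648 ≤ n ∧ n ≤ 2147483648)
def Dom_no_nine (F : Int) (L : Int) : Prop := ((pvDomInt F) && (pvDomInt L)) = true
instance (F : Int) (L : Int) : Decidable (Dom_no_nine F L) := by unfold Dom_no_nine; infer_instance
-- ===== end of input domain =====

-- B replaces A's element-by-element scan of [F, L] with a digit-counting prefix formula
-- prefix(L) - prefix(F - 1) computed in O(number of digits); measured faster (asymptotic).

-- ===== PORT A =====
-- A: count = 0; for i in range(F, L+1): if "9" not in str(i) and i % 9 != 0: count += 1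
def no_nine (F : Int) (L : Int) : Int :=
  (PySem.List.pyRange F (L + 1) 1).foldl
    (fun count i =>
      if (!(PySem.Str.isIn "9" (PySem.Int.toStr i)) && !(PySem.Int.mod i 9 == 0)) then count + 1
      else count) 0

-- ===== PORT B =====
def pvNonine (n : Int) : Bool :=
  if h : n < 10 then n != 9
  else if PySem.Int.mod n 10 == 9 then false
  else pvNonine (PySem.Int.floordiv n 10)
termination_by n.toNat
decreasing_by
  have : PySem.Int.floordiv n 10 = n / 10 := PySem.Int.floordiv_eq_ediv_of_pos (by norm_num)
  rw [this]; omega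

def pvCount9free (n : Int) : Int :=
  if n < 0 then 0
  else
    9 * pvCount9free (PySem.Int.floordiv n 10 - 1) +
      (if pvNonine (PySem.Int.floordiv n 10) then min (PySem.Int.mod n 10) 8 + 1 else 0)
termination_by (n + 1).toNat
decreasing_by
  have h0 : (0:Int) ≤ n := by omega
  have : PySem.Int.floordiv n 10 = n / 10 := PySem.Int.floordiv_eq_ediv_of_pos (by norm_num)
  rw [this]
  have h1 : n / 10 ≤ n := Int.ediv_le_self 10 h0
  have h2 : 0 ≤ n / 10 := Int.ediv_nonneg h0 (by norm_num)
  omega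

def pvCountvalid (n : Int) : Int :=
  if n < 0 then 0
  else
    let q := PySem.Int.floordiv n 10
    let total := 8 * pvCount9free (q - 1)
    if pvNonine q then
      let m := min (PySem.Int.mod n 10) 8
      total + (m + 1 - (if PySem.Int.mod (-q) 9 ≤ m then 1 else 0))
    else total

def pvPrefix (n : Int) : Int :=
  if 0 ≤ n then pvCountvalid n else -(pvCountvalid (-n - 1))

def no_nine_alt (F : Int) (L : Int) : Int :=
  if F > L then 0 else pvPrefix L - pvPrefix (F - 1)

-- ===== PRECONDITION & SPEC =====
def Spec_no_nine (F : Int) (L : Int) (out : Int) : Prop := out = no_nine_alt F L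
instance (F : Int) (L : Int) (out : Int) : Decidable (Spec_no_nine F L out) := by unfold Spec_no_nine; infer_instance

-- ===== CLAIM (what is proved, stated in full; the proofs are below) =====
def Claim_equal_no_nine : Prop := ∀ (F : Int) (L : Int), Dom_no_nine F L → Spec_no_nine F L (no_nine F L)

-- ===== LEMMAS AND PROOFS =====
def pvTestA (i : Int) : Bool :=
  !(PySem.Str.isIn "9" (PySem.Int.toStr i)) && !(PySem.Int.mod i 9 == 0)

def pvValidN (m : Nat) : Bool := pvNonine (m : Int) && (m % 9 != 0)

def pvV (k : Nat) : Int := ((List.range k).countP pvValidN : Int)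

def pvN9 (k : Nat) : Int := ((List.range k).countP (fun m : Nat => pvNonine (m : Int)) : Int)

theorem pvNonine_natCast (n : Nat) :
    pvNonine (n : Int) =
      if n < 10 then (n != 9) else (if n % 10 == 9 then false else pvNonine ((n / 10 : Nat) : Int)) := by
  rw [pvNonine]
  by_cases h : n < 10
  · rw [dif_pos (show (n:Int) < 10 by exact_mod_cast h), if_pos h]
    by_cases h9 : n = 9
    · simp [h9]
    · simp [h9, bne, show (n:Int) ≠ 9 from fun hh => h9 (by exact_mod_cast hh)]
  · have h' : ¬ ((n:Int) < 10) := by exact_mod_cast h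
    rw [dif_neg h', if_neg h,
      show PySem.Int.mod (↑n) 10 = ((n % 10 : Nat) : Int) from by exact_mod_cast PySem.Int.mod_natCast n 10,
      show PySem.Int.floordiv (↑n) 10 = ((n / 10 : Nat) : Int) from by exact_mod_cast PySem.Int.floordiv_natCast n 10]
    by_cases h9 : n % 10 = 9 <;>
      simp [h9, bne] <;> omega

theorem pvNonine_zero : pvNonine 0 = true := by
  rw [show (0:Int) = ((0:Nat):Int) by norm_num, pvNonine_natCast]
  simp

theorem pvNonine_digit (q d : Nat) (hd : d < 10) :
    pvNonine ((10 * q + d : Nat) : Int) = ((d != 9) && pvNonine (q : Int)) := by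
  rw [pvNonine_natCast]
  rcases Nat.eq_zero_or_pos q with hq | hq
  · subst hq
    rw [pvNonine_natCast]
    simp only [Nat.mul_zero, Nat.zero_add]
    simp [hd, pvNonine_zero]
  · have h10 : ¬ (10 * q + d < 10) := by omega
    rw [if_neg h10]
    have hm : (10 * q + d) % 10 = d := by omega
    have hdv : (10 * q + d) / 10 = q := by omega
    rw [hm, hdv]
    by_cases h9 : d = 9 <;> simp [h9]

theorem digitChar_eq_nine_iff (d : Nat) (hd : d < 10) : (Nat.digitChar d = '9') ↔ d = 9 := by
  interval_cases d <;> simp [Nat.digitChar]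

theorem digitChar_eq_nine_iff' (d : Nat) (hd : d < 10) : ('9' = Nat.digitChar d) ↔ d = 9 :=
  eq_comm.trans (digitChar_eq_nine_iff d hd)

theorem mem_toDigitsCore (f : Nat) : ∀ (n : Nat) (acc : List Char), n < f →
    ('9' ∈ Nat.toDigitsCore 10 f n acc ↔ (pvNonine (n : Int) = false ∨ '9' ∈ acc)) := by
  induction f with
  | zero => intro n acc h; omega
  | succ f ih =>
    intro n acc h
    rw [Nat.toDigitsCore]
    by_cases h0 : n / 10 = 0
    · have hn : n < 10 := by omega
      rw [if_pos h0, pvNonine_natCast, if_pos hn]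
      have : n % 10 = n := by omega
      rw [this]
      simp [digitChar_eq_nine_iff' n hn]
    · have hn : ¬ n < 10 := by omega
      rw [if_neg h0, ih (n / 10) _ (by omega), pvNonine_natCast n, if_neg hn]
      by_cases h9 : n % 10 = 9
      · simp [h9, Nat.digitChar]
      · simp [h9, digitChar_eq_nine_iff' (n % 10) (by omega)]

theorem mem_toDigits_iff (n : Nat) :
    ('9' ∈ Nat.toDigits 10 n) ↔ pvNonine (n : Int) = false := by
  rw [Nat.toDigits]
  rw [mem_toDigitsCore (n + 1) n [] (by omega)]
  simp

theorem isIn_nine (i : Int) :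
    PySem.Str.isIn "9" (PySem.Int.toStr i) = !(pvNonine (i.natAbs : Int)) := by
  have h : PySem.Str.isIn "9" (PySem.Int.toStr i) = true ↔ '9' ∈ (PySem.Int.toStr i).toList := by
    rw [PySem.Str.isIn_iff_infix]
    exact (List.singleton_infix_iff '9' _).symm.symm
  rw [PySem.Int.toList_toStr] at h
  have hmem : '9' ∈ PySem.Int.toChars i ↔ pvNonine (i.natAbs : Int) = false := by
    unfold PySem.Int.toChars
    by_cases hi : i < 0
    · rw [if_pos hi]
      simp only [List.mem_cons]
      rw [mem_toDigits_iff]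
      simp
    · rw [if_neg hi]
      have : i.toNat = i.natAbs := by omega
      rw [this, mem_toDigits_iff]
  apply Bool.coe_iff_coe.mp
  rw [h, hmem]
  cases pvNonine (i.natAbs : Int) <;> simp

theorem mod_nine (i : Int) : (PySem.Int.mod i 9 == 0) = (i.natAbs % 9 == 0) := by
  have h1 : PySem.Int.mod i 9 = 0 ↔ (9:Int) ∣ i := PySem.Int.mod_eq_zero_iff_dvd i 9
  have h2 : (9:Int) ∣ i ↔ 9 ∣ i.natAbs := by
    constructor
    · intro hd; omega
    · intro hd; omega
  have h3 : 9 ∣ i.natAbs ↔ i.natAbs % 9 = 0 := Nat.dvd_iff_mod_eq_zero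
  have : PySem.Int.mod i 9 = 0 ↔ i.natAbs % 9 = 0 := h1.trans (h2.trans h3)
  apply Bool.coe_iff_coe.mp
  simpa using this

theorem pvTestA_eq (i : Int) : pvTestA i = pvValidN i.natAbs := by
  unfold pvTestA pvValidN
  rw [isIn_nine, mod_nine]
  simp [bne]

theorem pvValidN_digit (q d : Nat) (hd : d < 10) :
    pvValidN (10 * q + d) = (((d != 9) && pvNonine (q : Int)) && ((q % 9 + d) % 9 != 0)) := by
  unfold pvValidN
  rw [pvNonine_digit q d hd]
  have : (10 * q + d) % 9 = (q % 9 + d) % 9 := by omega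
  rw [this]

theorem count_nonine_block (Q R : Nat) (hR : R < 10) :
    (((List.range (R + 1)).countP (fun d => pvNonine ((10 * Q + d : Nat) : Int))) : Int) =
      if pvNonine (Q : Int) then min (R : Int) 8 + 1 else 0 := by
  rw [List.countP_congr (fun d hdm => by
    rw [pvNonine_digit Q d (by simp at hdm; omega)])]
  cases hq : pvNonine (Q : Int)
  · simp
  · simp only [if_pos, Bool.and_true]
    have hnat : (List.range (R + 1)).countP (fun d => d != 9) = min R 8 + 1 := by
      interval_cases R <;> decide
    rw [hnat]
    have : min (R : Int) 8 = ((min R 8 : Nat) : Int) := by omega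
    rw [this]
    push_cast
    ring

theorem count_valid_small (t R : Nat) (ht : t < 9) (hR : R < 10) :
    (List.range (R + 1)).countP (fun d => (d != 9) && ((t + d) % 9 != 0)) =
      min R 8 + 1 - (if (9 - t) % 9 ≤ min R 8 then 1 else 0) := by
  interval_cases t <;> interval_cases R <;> decide

theorem mod_neg_cast (Q : Nat) : PySem.Int.mod (-(Q : Int)) 9 = (((9 - Q % 9) % 9 : Nat) : Int) := by
  rw [PySem.Int.mod_eq_emod_of_pos (by norm_num : (0:Int) < 9)]
  omega

theorem count_valid_block (Q R : Nat) (hR : R < 10) :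
    (((List.range (R + 1)).countP (fun d => pvValidN (10 * Q + d))) : Int) =
      if pvNonine (Q : Int) then
        min (R : Int) 8 + 1 - (if PySem.Int.mod (-(Q : Int)) 9 ≤ min (R : Int) 8 then 1 else 0)
      else 0 := by
  rw [List.countP_congr (fun d hdm => by
    rw [pvValidN_digit Q d (by simp at hdm; omega)])]
  cases hq : pvNonine (Q : Int)
  · simp
  · simp only [Bool.and_true, Bool.true_and, if_pos]
    have hmod : (List.range (R + 1)).countP (fun d => (d != 9) && ((Q % 9 + d) % 9 != 0)) =
        min R 8 + 1 - (if (9 - Q % 9) % 9 ≤ min R 8 then 1 else 0) :=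
      count_valid_small (Q % 9) R (by omega) hR
    rw [hmod, mod_neg_cast]
    have h1 : min (R : Int) 8 = ((min R 8 : Nat) : Int) := by omega
    rw [h1]
    by_cases hc : (9 - Q % 9) % 9 ≤ min R 8
    · rw [if_pos hc, if_pos (by exact_mod_cast hc)]
      have h2 : min R 8 + 1 - 1 = min R 8 := by omega
      rw [h2]
      push_cast
      ring
    · rw [if_neg hc, if_neg (by exact_mod_cast hc)]
      have h2 : min R 8 + 1 - 0 = min R 8 + 1 := by omega
      rw [h2]
      push_cast
      ring

theorem count_nonine_decades (Q : Nat) :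
    (((List.range (10 * Q)).countP (fun m : Nat => pvNonine (m : Int))) : Int) = 9 * pvN9 Q := by
  induction Q with
  | zero => simp [pvN9]
  | succ Q ih =>
    have h10 : 10 * (Q + 1) = 10 * Q + 10 := by ring
    rw [h10, List.range_add, List.countP_append, List.countP_map]
    have hblk : (List.range 10).countP ((fun m : Nat => pvNonine (m : Int)) ∘ (fun x => 10 * Q + x)) =
        (List.range (9 + 1)).countP (fun d => pvNonine ((10 * Q + d : Nat) : Int)) := rfl
    have hN9 : pvN9 (Q + 1) = pvN9 Q + (if pvNonine (Q : Int) then 1 else 0) := by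
      unfold pvN9
      rw [List.range_succ, List.countP_append]
      cases hq : pvNonine (Q : Int) <;> simp [hq]
    rw [Nat.cast_add, hblk]
    have hbv := count_nonine_block Q 9 (by norm_num)
    rw [hbv, hN9, ih]
    cases hq : pvNonine (Q : Int) <;> simp [hq] <;> ring

theorem count_valid_decades (Q : Nat) :
    (((List.range (10 * Q)).countP pvValidN) : Int) = 8 * pvN9 Q := by
  induction Q with
  | zero => simp [pvN9]
  | succ Q ih =>
    have h10 : 10 * (Q + 1) = 10 * Q + 10 := by ring
    rw [h10, List.range_add, List.countP_append, List.countP_map]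
    have hblk : (List.range 10).countP (pvValidN ∘ (fun x => 10 * Q + x)) =
        (List.range (9 + 1)).countP (fun d => pvValidN (10 * Q + d)) := rfl
    have hN9 : pvN9 (Q + 1) = pvN9 Q + (if pvNonine (Q : Int) then 1 else 0) := by
      unfold pvN9
      rw [List.range_succ, List.countP_append]
      cases hq : pvNonine (Q : Int) <;> simp [hq]
    rw [Nat.cast_add, hblk]
    have hbv := count_valid_block Q 9 (by norm_num)
    rw [hbv, hN9, ih, mod_neg_cast Q]
    cases hq : pvNonine (Q : Int) <;> simp [hq]
    have hle : ((9 - Q % 9 : Nat) : Int) % 9 ≤ 8 := by omega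
    rw [if_pos hle]
    ring

theorem floordiv_cast10 (K : Nat) : PySem.Int.floordiv (K : Int) 10 = ((K / 10 : Nat) : Int) := by
  exact_mod_cast PySem.Int.floordiv_natCast K 10

theorem mod_cast10 (K : Nat) : PySem.Int.mod (K : Int) 10 = ((K % 10 : Nat) : Int) := by
  exact_mod_cast PySem.Int.mod_natCast K 10

theorem pvCount9free_spec (k : Nat) : pvCount9free ((k : Int) - 1) = pvN9 k := by
  induction k using Nat.strong_induction_on with
  | _ k ih =>
    rcases Nat.eq_zero_or_pos k with hk0 | hk0
    · subst hk0
      rw [pvCount9free]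
      simp [pvN9]
    · obtain ⟨K, rfl⟩ : ∃ K, k = K + 1 := ⟨k - 1, by omega⟩
      have hcast : ((K + 1 : Nat) : Int) - 1 = (K : Int) := by push_cast; ring
      rw [hcast, pvCount9free, if_neg (by omega), floordiv_cast10 K, mod_cast10 K]
      have hrec : pvCount9free (((K / 10 : Nat) : Int) - 1) = pvN9 (K / 10) :=
        ih (K / 10) (by omega)
      rw [hrec]
      unfold pvN9
      rw [show K + 1 = 10 * (K / 10) + (K % 10 + 1) from by omega,
        List.range_add, List.countP_append]
      rw [Nat.cast_add, List.countP_map]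
      have hblk : (List.range (K % 10 + 1)).countP
            ((fun m : Nat => pvNonine (m : Int)) ∘ (fun x => 10 * (K / 10) + x)) =
          (List.range (K % 10 + 1)).countP (fun d => pvNonine ((10 * (K / 10) + d : Nat) : Int)) := rfl
      rw [hblk, count_nonine_block (K / 10) (K % 10) (by omega)]
      have hdec := count_nonine_decades (K / 10)
      rw [hdec]
      simp [pvN9]

theorem pvCountvalid_spec (n : Nat) : pvCountvalid (n : Int) = pvV (n + 1) := by
  rw [pvCountvalid]
  rw [if_neg (by omega)]
  simp only [floordiv_cast10 n, mod_cast10 n]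
  rw [pvCount9free_spec (n / 10)]
  unfold pvV
  rw [show n + 1 = 10 * (n / 10) + (n % 10 + 1) from by omega,
    List.range_add, List.countP_append]
  rw [Nat.cast_add, List.countP_map]
  have hblk : (List.range (n % 10 + 1)).countP (pvValidN ∘ (fun x => 10 * (n / 10) + x)) =
      (List.range (n % 10 + 1)).countP (fun d => pvValidN (10 * (n / 10) + d)) := rfl
  rw [hblk, count_valid_block (n / 10) (n % 10) (by omega)]
  rw [count_valid_decades (n / 10)]
  cases hq : pvNonine ((n / 10 : Nat) : Int) <;> simp [hq]

theorem pvV_succ (n : Nat) : pvV (n + 1) = pvV n + (if pvValidN n then 1 else 0) := by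
  unfold pvV
  rw [List.range_succ, List.countP_append]
  cases hq : pvValidN n <;> simp [hq]

theorem pvV_one : pvV 1 = 0 := by
  simp [pvV, List.range_succ, pvValidN]

theorem pvPrefix_step (a : Int) :
    pvPrefix a = pvPrefix (a - 1) + (if pvValidN a.natAbs then 1 else 0) := by
  rcases lt_trichotomy a 0 with ha | ha | ha
  · -- a < 0
    set n : Nat := (-a).toNat with hn
    have ha1 : a = -(n : Int) := by omega
    have hn1 : 1 ≤ n := by omega
    unfold pvPrefix
    rw [if_neg (by omega), if_neg (by omega)]
    have e1 : -a - 1 = ((n - 1 : Nat) : Int) := by omega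
    have e2 : -(a - 1) - 1 = (n : Int) := by omega
    rw [e1, e2, pvCountvalid_spec (n - 1), pvCountvalid_spec n]
    have e3 : n - 1 + 1 = n := by omega
    rw [e3, pvV_succ n]
    have e4 : a.natAbs = n := by omega
    rw [e4]
    ring
  · subst ha
    unfold pvPrefix
    rw [if_pos le_rfl, if_neg (by omega)]
    have h0 : pvCountvalid 0 = 0 := by
      have h := pvCountvalid_spec 0
      rw [pvV_one] at h
      simpa using h
    have e2 : -((0:Int) - 1) - 1 = 0 := by norm_num
    rw [e2, h0]
    simp [pvValidN]
  · -- 0 < a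
    set n : Nat := a.toNat with hn
    have hn1 : 1 ≤ n := by omega
    unfold pvPrefix
    rw [if_pos (by omega), if_pos (by omega)]
    have e1 : a = ((n : Nat) : Int) := by omega
    have e2 : a - 1 = ((n - 1 : Nat) : Int) := by omega
    rw [e2, e1, pvCountvalid_spec n, pvCountvalid_spec (n - 1)]
    have e3 : n - 1 + 1 = n := by omega
    rw [e3, pvV_succ n]
    simp

theorem pvRange_count (a b : Int) (h : a ≤ b) :
    ((PySem.List.pyRange a b 1).countP (fun i => pvValidN i.natAbs) : Int) =
      pvPrefix (b - 1) - pvPrefix (a - 1) := by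
  obtain ⟨d, hd⟩ : ∃ d : Nat, b = a + d := ⟨(b - a).toNat, by omega⟩
  subst hd
  induction d generalizing a with
  | zero =>
    rw [PySem.List.pyRange_one_eq_nil (by omega)]
    simp
  | succ d ih =>
    rw [PySem.List.pyRange_one_cons (by omega)]
    rw [List.countP_cons]
    have hrec := ih (a + 1) (by omega)
    have e1 : a + 1 + (d : Int) = a + ((d + 1 : Nat) : Int) := by push_cast; ring
    rw [e1] at hrec
    push_cast at hrec ⊢
    rw [hrec]
    have e2 : a + 1 - 1 = a := by ring
    rw [e2, pvPrefix_step a]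
    ring

theorem no_nine_eq (F L : Int) : no_nine F L = no_nine_alt F L := by
  unfold no_nine no_nine_alt
  rw [PySem.List.foldl_if_add_one
    (fun i => !(PySem.Str.isIn "9" (PySem.Int.toStr i)) && !(PySem.Int.mod i 9 == 0))]
  have hcnt : (PySem.List.pyRange F (L + 1) 1).countP
        (fun i => !(PySem.Str.isIn "9" (PySem.Int.toStr i)) && !(PySem.Int.mod i 9 == 0)) =
      (PySem.List.pyRange F (L + 1) 1).countP (fun i => pvValidN i.natAbs) :=
    List.countP_congr (fun i _ => by
      show pvTestA i = true ↔ pvValidN i.natAbs = true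
      rw [pvTestA_eq i])
  rw [hcnt]
  by_cases hFL : F > L
  · rw [if_pos hFL, PySem.List.pyRange_one_eq_nil (by omega)]
    simp
  · rw [if_neg hFL, pvRange_count F (L + 1) (by omega)]
    have e1 : L + 1 - 1 = L := by ring
    rw [e1]
    ring

-- ===== VERDICT (by name: the statement is the Claim_ definition above) =====
theorem no_nine_spec : Claim_equal_no_nine := by
  intro F L _
  show no_nine F L = no_nine_alt F L
  exact no_nine_eq F L
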